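-- pv_equiv track=rewrite | github.com/notshraii/dic | update_dicom_tags.py | is_valid_uid
-- ===== SOURCE A (Python) =====
-- def is_valid_uid(uid: str) -> bool:
--     """
--     Validate that a UID follows DICOM format requirements.
--
--     DICOM UIDs must:
--     - Contain only numeric characters and dots
--     - Each component must not start with 0 (unless it's a single 0)
--     - Maximum length of 64 characters
--     - Components separated by dots
--
--     Args:
--         uid: UID string to validate
--
--     Returns:
--         True if valid, False otherwise
--     """
--     if not uid or not isinstance(uid, str):
--         return False
--
--     if len(uid) > 64:
--         return False
--
--     # Split by dots and validate each component
--     components = uid.split('.')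
--     if not components:
--         return False
--
--     for component in components:
--         if not component:
--             return False
--         # Component must be numeric
--         if not component.isdigit():
--             return False
--         # Component must not start with 0 unless it's just "0"
--         if len(component) > 1 and component.startswith('0'):
--             return False
--
--     return True
-- ===== SOURCE B (Python) =====
-- def is_valid_uid(uid: str) -> bool:
--     """Single-pass validation: scan characters once, tracking the current
--     component's length and whether it started with '0', instead of
--     building the split list."""
--     if not uid or not isinstance(uid, str):
--         return False
--     if len(uid) > 64:
--         return False
--     length = 0
--     zero = False
--     for c in uid:
--         if c == '.':
--             if length == 0 or (length > 1 and zero):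
--                 return False
--             length, zero = 0, False
--         elif '0' <= c <= '9':
--             if length == 0:
--                 zero = (c == '0')
--             length += 1
--         else:
--             return False
--     return length != 0 and not (length > 1 and zero)
-- ===== Notes on version B (the rewrite author's own statement) =====
-- stated objective: alternative
-- what changed: Replaces the dot-split plus per-component loop by a single character scan that tracks the current component's length and leading-zero flag, never materialising the component list.
import Mathlib
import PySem

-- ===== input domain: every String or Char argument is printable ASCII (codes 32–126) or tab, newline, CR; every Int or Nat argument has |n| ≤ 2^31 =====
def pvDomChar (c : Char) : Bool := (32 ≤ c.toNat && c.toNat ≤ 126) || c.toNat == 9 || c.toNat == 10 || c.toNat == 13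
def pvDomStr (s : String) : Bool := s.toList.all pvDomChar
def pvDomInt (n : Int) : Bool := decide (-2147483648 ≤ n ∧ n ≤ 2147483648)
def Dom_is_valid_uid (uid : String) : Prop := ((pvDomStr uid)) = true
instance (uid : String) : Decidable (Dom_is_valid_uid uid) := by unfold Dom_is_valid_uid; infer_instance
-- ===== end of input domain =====

-- B replaces the dot-split + per-component loop by one left-to-right character scan
-- carrying the current component's length and leading-zero flag (objective: alternative).

-- ===== PORT A =====
-- literal transliteration of A: early guards, uid.split('.'), then the for-loop
-- over components with its three early-return checks (the loop with early
-- `return False` is rendered as List.all of the conjunction of the checks, in order).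
def is_valid_uid (uid : String) : Bool :=
  if uid = "" then false                              -- `not uid` (isinstance is always true)
  else if PySem.Str.len uid > 64 then false           -- `len(uid) > 64`
  else
    let components := PySem.Chars.splitOn uid.toList ['.']   -- uid.split('.')
    if components = [] then false                     -- `if not components`
    else components.all (fun comp =>
      !(comp = []) &&                                  -- `if not component: return False`
      PySem.Chars.strIsdigit comp &&                   -- `if not component.isdigit(): return False`
      !(decide (comp.length > 1) && PySem.Chars.startswith comp ['0']))

-- ===== PORT B =====
-- B's scan loop: state = (length of current component, did it start with '0').
def is_valid_uid_alt_go : List Char → Nat → Bool → Bool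
  | [], len, zero => !(len = 0) && !(decide (len > 1) && zero)
  | c :: rest, len, zero =>
      if c = '.' then
        (!(len = 0 || (decide (len > 1) && zero))) && is_valid_uid_alt_go rest 0 false
      else if '0' ≤ c && c ≤ '9' then
        is_valid_uid_alt_go rest (len + 1) (if len = 0 then decide (c = '0') else zero)
      else false

def is_valid_uid_alt (uid : String) : Bool :=
  if uid = "" then false
  else if PySem.Str.len uid > 64 then false
  else is_valid_uid_alt_go uid.toList 0 false

-- ===== PRECONDITION & SPEC =====
def Spec_is_valid_uid (uid : String) (out : Bool) : Prop := out = is_valid_uid_alt uid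
instance (uid : String) (out : Bool) : Decidable (Spec_is_valid_uid uid out) := by unfold Spec_is_valid_uid; infer_instance

-- ===== CLAIM (what is proved, stated in full; the proofs are below) =====
def Claim_equal_is_valid_uid : Prop := ∀ (uid : String), Dom_is_valid_uid uid → Spec_is_valid_uid uid (is_valid_uid uid)

-- ===== LEMMAS AND PROOFS =====

-- structural model of `split` on '.': `cur` is the current component prefix (in order)
def pvSplitDot (cur : List Char) : List Char → List (List Char)
  | [] => [cur]
  | c :: rest => if c = '.' then cur :: pvSplitDot [] rest else pvSplitDot (cur ++ [c]) rest

def pvCompOK (comp : List Char) : Bool :=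
  !(comp = []) && PySem.Chars.strIsdigit comp &&
  !(decide (comp.length > 1) && PySem.Chars.startswith comp ['0'])

theorem pvSplitDot_ne_nil (l cur : List Char) : pvSplitDot cur l ≠ [] := by
  induction l generalizing cur with
  | nil => simp [pvSplitDot]
  | cons c rest ih => simp only [pvSplitDot]; split <;> simp [ih]

theorem pv_go_eq (fuel : Nat) : ∀ (l cur : List Char) (acc : List (List Char)),
    l.length < fuel →
    PySem.Chars.splitOn.go ['.'] fuel l cur acc = acc.reverse ++ pvSplitDot cur.reverse l := by
  induction fuel with
  | zero => intro l cur acc h; omega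
  | succ n ih =>
    intro l cur acc h
    cases l with
    | nil => simp [PySem.Chars.splitOn.go, pvSplitDot]
    | cons c rest =>
      simp only [PySem.Chars.splitOn.go]
      by_cases hc : c = '.'
      · subst hc
        rw [if_pos (by simp [List.isPrefixOf])]
        rw [show List.drop ['.'].length ('.' :: rest) = rest from rfl]
        rw [ih rest [] (cur.reverse :: acc) (by simpa using Nat.lt_of_succ_lt_succ h)]
        simp [pvSplitDot]
      · rw [if_neg (by simp [List.isPrefixOf]; exact fun h' => hc h'.symm)]
        rw [ih rest (c :: cur) acc (by simpa using Nat.lt_of_succ_lt_succ h)]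
        simp [pvSplitDot, hc]

theorem splitOn_eq_pvSplitDot (s : List Char) :
    PySem.Chars.splitOn s ['.'] = pvSplitDot [] s := by
  unfold PySem.Chars.splitOn
  simpa using pv_go_eq (s.length + 1) s [] [] (by omega)

-- a component prefix containing a non-digit poisons the whole split
theorem pv_bad_prefix (l : List Char) : ∀ cur, cur.all PySem.Chars.isdigit = false →
    (pvSplitDot cur l).all pvCompOK = false := by
  induction l with
  | nil =>
    intro cur h
    simp [pvSplitDot, pvCompOK, PySem.Chars.strIsdigit, h]
  | cons c rest ih =>
    intro cur h
    simp only [pvSplitDot]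
    by_cases hc : c = '.'
    · simp [hc, pvCompOK, PySem.Chars.strIsdigit, h]
    · rw [if_neg hc, ih (cur ++ [c]) (by simp [List.all_append, h])]

theorem pv_headZero (cur : List Char) :
    PySem.Chars.startswith cur ['0'] = decide (cur.head? = some '0') := by
  cases cur with
  | nil => rfl
  | cons a t =>
    by_cases hA : a = '0' <;>
      simp [PySem.Chars.startswith, List.isPrefixOf, hA, Ne.symm]

theorem pv_go_spec (l : List Char) : ∀ cur, cur.all PySem.Chars.isdigit = true →
    is_valid_uid_alt_go l cur.length (decide (cur.head? = some '0')) =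
      (pvSplitDot cur l).all pvCompOK := by
  induction l with
  | nil =>
    intro cur h
    simp only [is_valid_uid_alt_go, pvSplitDot, List.all_cons, List.all_nil, Bool.and_true,
      pvCompOK, PySem.Chars.strIsdigit, h, pv_headZero]
    cases cur <;> simp
  | cons c rest ih =>
    intro cur h
    simp only [is_valid_uid_alt_go, pvSplitDot]
    by_cases hc : c = '.'
    · rw [if_pos hc, if_pos hc]
      have this2 : is_valid_uid_alt_go rest 0 false = (pvSplitDot [] rest).all pvCompOK := by
        simpa using ih [] (by simp)
      have hfirst : (!(decide (cur.length = 0) ||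
          (decide (cur.length > 1) && decide (cur.head? = some '0')))) = pvCompOK cur := by
        simp only [pvCompOK, PySem.Chars.strIsdigit, pv_headZero, h]
        cases cur <;> simp
      rw [List.all_cons, ← hfirst, this2]
    · rw [if_neg hc, if_neg hc]
      by_cases hd : ('0' ≤ c && c ≤ '9') = true
      · rw [if_pos hd]
        have hall : (cur ++ [c]).all PySem.Chars.isdigit = true := by
          simp [List.all_append, h, PySem.Chars.isdigit]
          exact ⟨by simpa using (Bool.and_elim_left hd), by simpa using (Bool.and_elim_right hd)⟩
        have := ih (cur ++ [c]) hall
        rw [show (cur ++ [c]).length = cur.length + 1 from by simp] at this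
        rw [show (decide ((cur ++ [c]).head? = some '0')) =
            (if cur.length = 0 then decide (c = '0') else decide (cur.head? = some '0')) from by
          cases cur <;> simp] at this
        exact this
      · rw [if_neg hd]
        rw [pv_bad_prefix rest (cur ++ [c]) ?_]
        simp only [List.all_append, List.all_cons, List.all_nil, h, Bool.true_and, Bool.and_true]
        simpa [PySem.Chars.isdigit] using hd

-- ===== VERDICT (by name: the statement is the Claim_ definition above) =====
theorem is_valid_uid_spec : Claim_equal_is_valid_uid := by
  intro uid _
  unfold Spec_is_valid_uid is_valid_uid is_valid_uid_alt
  by_cases h0 : uid = ""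
  · simp [h0]
  · rw [if_neg h0, if_neg h0]
    by_cases h64 : PySem.Str.len uid > 64
    · rw [if_pos h64, if_pos h64]
    · rw [if_neg h64, if_neg h64]
      rw [splitOn_eq_pvSplitDot]
      rw [if_neg (pvSplitDot_ne_nil uid.toList [])]
      have this2 : is_valid_uid_alt_go uid.toList 0 false =
          (pvSplitDot [] uid.toList).all pvCompOK := by
        simpa using pv_go_spec uid.toList [] (by simp)
      rw [this2]
      rfl
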